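-- pv_equiv track=rewrite | github.com/renta0426/NVIDIA-Nemotron-Model-Reasoning-Challenge | cuda-train-data-analysis-v1/bit_synth_exact_trace_cot_v1/generate_bit_synth_exact_trace_cot_v1.py | apply_affine_coeffs
-- ===== SOURCE A (Python) =====
-- def apply_affine_coeffs(coeffs: tuple[tuple[int, ...], ...], bits: str) -> str:
--     vector = [int(bit) for bit in bits] + [1]
--     output_bits: list[str] = []
--     for coefficients in coeffs:
--         bit = 0
--         for left, right in zip(vector, coefficients):
--             bit ^= left & right
--         output_bits.append(str(bit))
--     return "".join(output_bits)
-- ===== SOURCE B (Python) =====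
-- def apply_affine_coeffs(coeffs, bits):
--     vector = [int(bit) for bit in bits] + [1]
--
--     def dot(pairs):
--         # XOR-of-ANDs by balanced divide and conquer (XOR is associative)
--         if not pairs:
--             return 0
--         if len(pairs) == 1:
--             left, right = pairs[0]
--             return left & right
--         mid = len(pairs) // 2
--         return dot(pairs[:mid]) ^ dot(pairs[mid:])
--
--     return "".join(str(dot(list(zip(vector, row)))) for row in coeffs)
-- ===== Notes on version B (the rewrite author's own statement) =====
-- stated objective: alternative
-- what changed: Each row's XOR-of-AND dot product is computed by a balanced divide-and-conquer recursion over the zipped pair list (split in halves, XOR the halves; correct since XOR is associative) instead of A's linear scalar-accumulator loop, and the output string is built by mapping rows through this helper rather than appending to an accumulator list.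
import Mathlib
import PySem

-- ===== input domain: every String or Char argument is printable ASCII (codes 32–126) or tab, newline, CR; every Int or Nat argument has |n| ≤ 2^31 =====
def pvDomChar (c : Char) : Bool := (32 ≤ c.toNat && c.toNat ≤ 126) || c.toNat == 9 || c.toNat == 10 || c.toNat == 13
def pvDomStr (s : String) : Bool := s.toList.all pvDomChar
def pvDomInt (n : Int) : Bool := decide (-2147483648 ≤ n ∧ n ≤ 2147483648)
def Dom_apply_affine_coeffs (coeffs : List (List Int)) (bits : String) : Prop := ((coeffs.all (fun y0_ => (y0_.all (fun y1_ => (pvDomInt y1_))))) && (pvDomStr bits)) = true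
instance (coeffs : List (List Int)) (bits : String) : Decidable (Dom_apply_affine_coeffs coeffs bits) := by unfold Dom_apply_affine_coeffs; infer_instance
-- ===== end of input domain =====

-- B computes each row's XOR-of-AND dot product by balanced divide and conquer over the
-- zipped pair list (XOR is associative) instead of A's linear scalar-accumulator loop.


-- shared helper: Python's int(c) for a single character (both Source A and Source B call int(bit))
def pvDigit (c : Char) : Int := (PySem.Int.ofStr? (String.ofList [c])).getD 0

-- ===== PORT A =====
def apply_affine_coeffs (coeffs : List (List Int)) (bits : String) : String :=
  let vector : List Int := bits.toList.map pvDigit ++ [1]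
  let output_bits : List String := coeffs.foldl (fun acc coefficients =>
    acc ++ [PySem.Int.toStr ((vector.zip coefficients).foldl
      (fun bit lr => PySem.Int.bxor bit (PySem.Int.band lr.1 lr.2)) 0)]) []
  PySem.Str.join "" output_bits

-- ===== PORT B =====
-- Source B's dot: balanced divide and conquer over the pair list;
-- pairs[:mid] / pairs[mid:] with 0 ≤ mid ≤ len are exactly take/drop.
def pvDot (ps : List (Int × Int)) : Int :=
  match ps with
  | [] => 0
  | [p] => PySem.Int.band p.1 p.2
  | a :: b :: rest =>
    let mid := (a :: b :: rest).length / 2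
    PySem.Int.bxor (pvDot ((a :: b :: rest).take mid)) (pvDot ((a :: b :: rest).drop mid))
termination_by ps.length
decreasing_by
  · simp only [List.length_take, List.length_cons]; omega
  · simp only [List.length_drop, List.length_cons]; omega

def apply_affine_coeffs_alt (coeffs : List (List Int)) (bits : String) : String :=
  let vector : List Int := bits.toList.map pvDigit ++ [1]
  PySem.Str.join "" (coeffs.map (fun row => PySem.Int.toStr (pvDot (vector.zip row))))

-- ===== PRECONDITION & SPEC =====
-- Pre_ excludes exactly the inputs where int(bit) raises ValueError (some char of bits not a decimal digit); both A and B raise there.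
def Pre_apply_affine_coeffs (coeffs : List (List Int)) (bits : String) : Prop :=
  bits.toList.all Char.isDigit = true
instance (coeffs : List (List Int)) (bits : String) : Decidable (Pre_apply_affine_coeffs coeffs bits) := by unfold Pre_apply_affine_coeffs; infer_instance
def pvWitness_apply_affine_coeffs : List (List Int) × String := ([[1, 0, 1], [0, 1]], "10")
def Spec_apply_affine_coeffs (coeffs : List (List Int)) (bits : String) (out : String) : Prop := out = apply_affine_coeffs_alt coeffs bits
instance (coeffs : List (List Int)) (bits : String) (out : String) : Decidable (Spec_apply_affine_coeffs coeffs bits out) := by unfold Spec_apply_affine_coeffs; infer_instance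

-- ===== CLAIM (what is proved, stated in full; the proofs are below) =====
def Claim_equal_apply_affine_coeffs : Prop := ∀ (coeffs : List (List Int)) (bits : String), Dom_apply_affine_coeffs coeffs bits → Pre_apply_affine_coeffs coeffs bits → Spec_apply_affine_coeffs coeffs bits (apply_affine_coeffs coeffs bits)

-- ===== LEMMAS AND PROOFS =====

-- sign/magnitude decomposition of Int, to reason about PySem.Int.bxor
def pvDec (s : Bool) (n : Nat) : Int := if s then -(n : Int) - 1 else n

lemma pv_dec_surj (a : Int) : ∃ s n, a = pvDec s n := by
  by_cases h : a < 0
  · exact ⟨true, (-a - 1).toNat, by simp [pvDec]; omega⟩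
  · exact ⟨false, a.toNat, by simp [pvDec]; omega⟩

lemma pv_bxor_dec (s t : Bool) (m n : Nat) :
    PySem.Int.bxor (pvDec s m) (pvDec t n) = pvDec (xor s t) (m ^^^ n) := by
  cases s <;> cases t <;> simp [pvDec, PySem.Int.bxor] <;> (try intro h) <;>
    (try split_ifs) <;> omega

lemma pv_bxor_assoc (a b c : Int) :
    PySem.Int.bxor (PySem.Int.bxor a b) c = PySem.Int.bxor a (PySem.Int.bxor b c) := by
  obtain ⟨s, m, rfl⟩ := pv_dec_surj a
  obtain ⟨t, n, rfl⟩ := pv_dec_surj b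
  obtain ⟨u, k, rfl⟩ := pv_dec_surj c
  simp [pv_bxor_dec, Nat.xor_assoc]

lemma pv_zero_bxor (a : Int) : PySem.Int.bxor 0 a = a := by
  rw [PySem.Int.bxor_comm]; simp

-- A's linear fold with seed a equals a XOR the fold with seed 0
lemma pv_fold_shift (l : List (Int × Int)) (a : Int) :
    l.foldl (fun bit lr => PySem.Int.bxor bit (PySem.Int.band lr.1 lr.2)) a
      = PySem.Int.bxor a (l.foldl (fun bit lr => PySem.Int.bxor bit (PySem.Int.band lr.1 lr.2)) 0) := by
  induction l generalizing a with
  | nil => simp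
  | cons p l ih =>
    simp only [List.foldl_cons]
    rw [ih (PySem.Int.bxor a _), ih (PySem.Int.bxor 0 _), pv_zero_bxor, pv_bxor_assoc]

lemma pv_fold_append (l₁ l₂ : List (Int × Int)) :
    (l₁ ++ l₂).foldl (fun bit lr => PySem.Int.bxor bit (PySem.Int.band lr.1 lr.2)) 0
      = PySem.Int.bxor (l₁.foldl (fun bit lr => PySem.Int.bxor bit (PySem.Int.band lr.1 lr.2)) 0)
                        (l₂.foldl (fun bit lr => PySem.Int.bxor bit (PySem.Int.band lr.1 lr.2)) 0) := by
  rw [List.foldl_append, pv_fold_shift]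

-- B's divide-and-conquer dot equals A's linear fold
lemma pvDot_eq_fold (ps : List (Int × Int)) :
    pvDot ps = ps.foldl (fun bit lr => PySem.Int.bxor bit (PySem.Int.band lr.1 lr.2)) 0 := by
  fun_induction pvDot ps with
  | case1 => rfl
  | case2 p => simp only [List.foldl_cons, List.foldl_nil]; rw [pv_zero_bxor]
  | case3 a b rest mid ih1 ih2 =>
    rw [ih1, ih2, ← pv_fold_append, List.take_append_drop]

lemma pv_foldl_append_singleton {α β : Type} (f : α → β) (l : List α) (acc : List β) :
    l.foldl (fun acc x => acc ++ [f x]) acc = acc ++ l.map f := by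
  induction l generalizing acc with
  | nil => simp
  | cons x l ih => simp [ih]

-- ===== VERDICT (by name: the statement is the Claim_ definition above) =====
theorem apply_affine_coeffs_spec : Claim_equal_apply_affine_coeffs := by
  intro coeffs bits _ _
  unfold Spec_apply_affine_coeffs apply_affine_coeffs apply_affine_coeffs_alt
  simp only []
  congr 1
  rw [pv_foldl_append_singleton]
  simp only [List.nil_append]
  exact List.map_congr_left fun row _ => by rw [pvDot_eq_fold]
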